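-- pv_equiv track=rewrite | github.com/birnuruzunn/Opamp_Circuit_Calculator | tasarım/denemeler.py | harfkontrol
-- ===== SOURCE A (Python) =====
-- def harfkontrol(test):
--     durum = True
--     sayilar = "+-.0123456789"
--     noktasay = 0
--     for i in range(0, len(test)):
--         for j in range(0, len(sayilar)):
--             if(test[i] == "."):
--                 noktasay = noktasay + 1
--                 if(noktasay <= 1):
--                     break
--                 elif(noktasay == 2):
--                     durum = False
--                     break
--             if (test[i] == sayilar[j]):
--                 break
--             elif ((test[i] != sayilar[j]) and (j == (len(sayilar)) - 1)):
--                 durum = False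
--                 break
--             elif (test[i] != sayilar[j]):
--                 continue
--         if (not durum):
--             break
--     return durum
-- ===== SOURCE B (Python) =====
-- def harfkontrol(test):
--     sayilar = "+-.0123456789"
--     valid = all(c in sayilar for c in test)
--     dots = sum(1 for c in test if c == ".")
--     return valid and dots <= 1
-- ===== Notes on version B (the rewrite author's own statement) =====
-- stated objective: simpler
-- what changed: Replaced A's fused nested loop (inner scan over the allowed-character string with break/continue and a mutable dot counter with early exit) by two independent whole-string passes: one membership check of every character and one dot count, combined at the end.
import Mathlib
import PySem

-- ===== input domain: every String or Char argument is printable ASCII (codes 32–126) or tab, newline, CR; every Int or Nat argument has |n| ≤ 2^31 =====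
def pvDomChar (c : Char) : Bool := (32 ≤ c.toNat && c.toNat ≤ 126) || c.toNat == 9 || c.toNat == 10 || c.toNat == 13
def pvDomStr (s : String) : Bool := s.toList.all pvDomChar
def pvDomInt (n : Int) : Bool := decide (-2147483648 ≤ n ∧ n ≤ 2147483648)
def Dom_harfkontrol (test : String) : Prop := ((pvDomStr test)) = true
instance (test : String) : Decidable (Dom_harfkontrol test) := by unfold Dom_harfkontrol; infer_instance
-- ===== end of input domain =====

-- B replaces A's fused nested break/continue loop by two independent passes (validity of every char, dot count); objective: simpler.

-- ===== PORT A =====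
-- inner loop over the remaining characters of `sayilar`; `rest = []` means j == len(sayilar)-1.
-- Returns the (durum, noktasay) state at the break / end of the inner loop.
def harfkontrolInner (c : Char) (say : List Char) (durum : Bool) (noktasay : Int) : Bool × Int :=
  match say with
  | [] => (durum, noktasay)
  | s :: rest =>
    if c = '.' then
      let n := noktasay + 1
      if n ≤ 1 then (durum, n)                 -- break
      else if n = 2 then (false, n)            -- durum = False; break
      else                                     -- fall through to the equality checks
        if c = s then (durum, n)
        else if rest = [] then (false, n)
        else harfkontrolInner c rest durum n
    else
      if c = s then (durum, noktasay)          -- break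
      else if rest = [] then (false, noktasay) -- j == len-1: durum = False; break
      else harfkontrolInner c rest durum noktasay  -- continue

-- outer loop over the characters of `test`, breaking when `not durum`
def harfkontrolOuter (chars : List Char) (say : List Char) (durum : Bool) (noktasay : Int) : Bool :=
  match chars with
  | [] => durum
  | c :: rest =>
    let st := harfkontrolInner c say durum noktasay
    if !st.1 then st.1 else harfkontrolOuter rest say st.1 st.2

def harfkontrol (test : String) : Bool :=
  harfkontrolOuter test.toList "+-.0123456789".toList true 0

-- ===== PORT B =====
def harfkontrol_alt (test : String) : Bool :=
  let sayilar := "+-.0123456789".toList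
  let valid := test.toList.all (fun c => sayilar.contains c)
  let dots := test.toList.foldl (fun acc c => if c = '.' then acc + 1 else acc) (0 : Int)
  valid && decide (dots ≤ 1)

-- ===== PRECONDITION & SPEC =====
def Spec_harfkontrol (test : String) (out : Bool) : Prop := out = harfkontrol_alt test
instance (test : String) (out : Bool) : Decidable (Spec_harfkontrol test out) := by unfold Spec_harfkontrol; infer_instance

-- ===== CLAIM (what is proved, stated in full; the proofs are below) =====
def Claim_equal_harfkontrol : Prop := ∀ (test : String), Dom_harfkontrol test → Spec_harfkontrol test (harfkontrol test)

-- ===== LEMMAS AND PROOFS =====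

def pvSay : List Char := "+-.0123456789".toList

def pvDots (l : List Char) : Int :=
  match l with
  | [] => 0
  | c :: rest => (if c = '.' then 1 else 0) + pvDots rest

lemma pvDots_nonneg (l : List Char) : 0 ≤ pvDots l := by
  induction l with
  | nil => simp [pvDots]
  | cons c rest ih => simp only [pvDots]; split <;> omega

lemma foldl_dots (l : List Char) (a : Int) :
    l.foldl (fun acc c => if c = '.' then acc + 1 else acc) a = a + pvDots l := by
  induction l generalizing a with
  | nil => simp [pvDots]
  | cons c rest ih => simp only [List.foldl, pvDots, ih]; split <;> omega

-- inner loop, non-dot character: linear scan with membership outcome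
lemma inner_nondot (c : Char) (hc : c ≠ '.') (say : List Char) (hne : say ≠ [])
    (d : Bool) (n : Int) :
    harfkontrolInner c say d n = (if c ∈ say then (d, n) else (false, n)) := by
  induction say with
  | nil => exact absurd rfl hne
  | cons s rest ih =>
    by_cases hcs : c = s
    · subst hcs; simp [harfkontrolInner, hc]
    · cases rest with
      | nil => simp [harfkontrolInner, hc, hcs]
      | cons t ts =>
        have h1 := ih (by simp)
        simp only [harfkontrolInner, if_neg hc] at h1 ⊢
        rw [if_neg hcs, if_neg (by simp : ¬(t :: ts = [])), h1]
        simp [hcs]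

-- outer loop characterisation from a reachable state (durum = true, noktasay ∈ {0,1})
lemma outer_char (chars : List Char) (n : Int) (hn : n = 0 ∨ n = 1) :
    harfkontrolOuter chars pvSay true n =
      (chars.all (fun c => pvSay.contains c) && decide (pvDots chars + n ≤ 1)) := by
  induction chars generalizing n with
  | nil => rcases hn with h | h <;> subst h <;> decide
  | cons c rest ih =>
    by_cases hc : c = '.'
    · subst hc
      rcases hn with h | h <;> subst h
      · have hi0 : harfkontrolInner '.' pvSay true 0 = (true, 1) := by decide
        simp only [harfkontrolOuter, hi0, Bool.not_true, Bool.false_eq_true, if_false]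
        rw [ih 1 (Or.inr rfl)]
        have hm : pvSay.contains '.' = true := by decide
        simp only [List.all_cons, hm, Bool.true_and, pvDots, reduceIte]
        congr 1
        simp only [decide_eq_decide]
        omega
      · have hi1 : harfkontrolInner '.' pvSay true 1 = (false, 2) := by decide
        have h3 := pvDots_nonneg rest
        simp [harfkontrolOuter, hi1, pvDots]
        intro _ _
        omega
    · by_cases hm : c ∈ pvSay
      · have hi : harfkontrolInner c pvSay true n = (true, n) := by
          rw [inner_nondot c hc pvSay (by decide) true n]; simp [hm]
        simp only [harfkontrolOuter, hi, Bool.not_true, Bool.false_eq_true, if_false]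
        rw [ih n hn]
        simp only [List.all_cons, List.contains_eq_mem, hm, decide_true, Bool.true_and, pvDots,
          if_neg hc]
        congr 1
        simp only [decide_eq_decide]
        omega
      · have hi : harfkontrolInner c pvSay true n = (false, n) := by
          rw [inner_nondot c hc pvSay (by decide) true n]; simp [hm]
        simp [harfkontrolOuter, hi, List.contains_eq_mem, hm]

-- ===== VERDICT (by name: the statement is the Claim_ definition above) =====
theorem harfkontrol_spec : Claim_equal_harfkontrol := by
  intro test _
  show harfkontrol test = harfkontrol_alt test
  simp only [harfkontrol, harfkontrol_alt]
  rw [show ("+-.0123456789".toList) = pvSay from rfl,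
      outer_char test.toList 0 (Or.inl rfl), foldl_dots]
  congr 1
  simp only [decide_eq_decide]
  omega
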